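-- pv_equiv track=rewrite | github.com/lehoangHUST/competitive_programming | leetcode/Easy/492_Construct_The_Rectangle.py | constructRectangle
-- ===== SOURCE A (Python) =====
-- from typing import List
--
-- def constructRectangle(area: int) -> List[int]:
--     diff = area
--     L, W = 0, 0
--     i = 1
--     while i * i <= area:
--         if area % i == 0:
--             j = area // i
--             if diff > abs(j - i):
--                 if j >= i:
--                     L = j
--                     W = i
--                 else:
--                     L = i
--                     W = j
--         i += 1
--     return [L, W]
-- ===== SOURCE B (Python) =====
-- from typing import List
--
-- def constructRectangle(area: int) -> List[int]:
--     if area <= 0: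
--         return [0, 0]
--     w = 1
--     while (w + 1) * (w + 1) <= area:
--         w += 1
--     while area % w:
--         w -= 1
--     return [area // w, w]
-- ===== Notes on version B (the rewrite author's own statement) =====
-- stated objective: simpler
-- what changed: B drops A's running-minimum state (diff/L/W and the per-divisor comparisons): it computes the integer square root by a simple upward scan and then walks w downward to the first divisor of area, returning [area // w, w] directly.
import Mathlib
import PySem

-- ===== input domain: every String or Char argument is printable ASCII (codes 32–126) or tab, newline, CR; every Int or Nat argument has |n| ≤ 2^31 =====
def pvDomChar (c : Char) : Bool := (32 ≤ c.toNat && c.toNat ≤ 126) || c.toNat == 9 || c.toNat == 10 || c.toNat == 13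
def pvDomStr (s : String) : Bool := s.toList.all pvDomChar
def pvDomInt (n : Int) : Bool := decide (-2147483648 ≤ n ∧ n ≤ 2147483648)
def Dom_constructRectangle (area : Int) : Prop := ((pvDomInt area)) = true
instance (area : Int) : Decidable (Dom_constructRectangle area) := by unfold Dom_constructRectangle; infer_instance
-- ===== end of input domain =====

-- B replaces A's running-minimum scan (diff/L/W) by an upward integer-sqrt scan followed by a
-- downward walk to the first divisor; objective: simpler (same O(sqrt(area)) cost).


-- ===== PORT A =====
-- A's while-loop, step for step (diff stays the initial value; fuel only makes it total).
def pvLoopA (area : Int) (fuel : Nat) (i L W diff : Int) : Int × Int :=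
  match fuel with
  | 0 => (L, W)
  | Nat.succ fuel =>
    if i * i ≤ area then
      if PySem.Int.mod area i = 0 then
        let j := PySem.Int.floordiv area i
        if diff > |j - i| then
          if i ≤ j then pvLoopA area fuel (i + 1) j i diff
          else pvLoopA area fuel (i + 1) i j diff
        else pvLoopA area fuel (i + 1) L W diff
      else pvLoopA area fuel (i + 1) L W diff
    else (L, W)

def constructRectangle (area : Int) : List Int :=
  let p := pvLoopA area (area.toNat + 1) 1 0 0 area
  [p.1, p.2]

-- ===== PORT B =====
-- first loop of B: raise w while (w+1)*(w+1) <= area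
def pvUpW (area : Int) (fuel : Nat) (w : Int) : Int :=
  match fuel with
  | 0 => w
  | Nat.succ fuel => if (w + 1) * (w + 1) ≤ area then pvUpW area fuel (w + 1) else w

-- second loop of B: lower w while area % w != 0
def pvDownW (area : Int) (fuel : Nat) (w : Int) : Int :=
  match fuel with
  | 0 => w
  | Nat.succ fuel => if PySem.Int.mod area w ≠ 0 then pvDownW area fuel (w - 1) else w

def constructRectangle_alt (area : Int) : List Int :=
  if area ≤ 0 then [0, 0]
  else
    let w := pvDownW area area.toNat (pvUpW area area.toNat 1)
    [PySem.Int.floordiv area w, w]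

-- ===== PRECONDITION & SPEC =====
def Spec_constructRectangle (area : Int) (out : List Int) : Prop := out = constructRectangle_alt area
instance (area : Int) (out : List Int) : Decidable (Spec_constructRectangle area out) := by unfold Spec_constructRectangle; infer_instance

-- ===== CLAIM (what is proved, stated in full; the proofs are below) =====
def Claim_equal_constructRectangle : Prop := ∀ (area : Int), Dom_constructRectangle area → Spec_constructRectangle area (constructRectangle area)

-- ===== LEMMAS AND PROOFS =====

-- pvUpW computes the integer square root of area (for 1 ≤ area, started at any admissible w with enough fuel).
theorem pvUpW_spec (area : Int) :
    ∀ (fuel : Nat) (w : Int), 1 ≤ w → w * w ≤ area → (area - w).toNat ≤ fuel →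
      1 ≤ pvUpW area fuel w ∧ pvUpW area fuel w * pvUpW area fuel w ≤ area ∧
        area < (pvUpW area fuel w + 1) * (pvUpW area fuel w + 1) := by
  intro fuel
  induction fuel with
  | zero =>
    intro w hw hsq hfu
    have hw1 : w = 1 := by nlinarith [Int.toNat_of_nonneg (show (0:Int) ≤ area - w by nlinarith), hfu]
    subst hw1
    simp only [pvUpW]
    refine ⟨le_refl 1, hsq, ?_⟩
    have : area ≤ 1 := by omega
    nlinarith
  | succ fuel ih =>
    intro w hw hsq hfu
    simp only [pvUpW]
    by_cases h : (w + 1) * (w + 1) ≤ area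
    · rw [if_pos h]
      have hwlt : w < area := by nlinarith
      exact ih (w + 1) (by omega) h (by omega)
    · rw [if_neg h]
      exact ⟨hw, hsq, by omega⟩

-- pvDownW returns the greatest divisor of area that is ≤ its starting point.
theorem pvDownW_spec (area : Int) :
    ∀ (fuel : Nat) (w : Int), 1 ≤ w → (w - 1).toNat ≤ fuel →
      1 ≤ pvDownW area fuel w ∧ pvDownW area fuel w ≤ w ∧
        PySem.Int.mod area (pvDownW area fuel w) = 0 ∧
        ∀ e, pvDownW area fuel w < e → e ≤ w → PySem.Int.mod area e ≠ 0 := by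
  intro fuel
  induction fuel with
  | zero =>
    intro w hw hfu
    have hw1 : w = 1 := by omega
    subst hw1
    simp only [pvDownW]
    refine ⟨le_refl 1, le_refl 1, ?_, ?_⟩
    · rw [PySem.Int.mod_eq_zero_iff_dvd]; exact one_dvd area
    · intro e he1 he2 _; omega
  | succ fuel ih =>
    intro w hw hfu
    simp only [pvDownW]
    by_cases h : PySem.Int.mod area w ≠ 0
    · rw [if_pos h]
      have hw2 : 2 ≤ w := by
        by_contra hcon
        have : w = 1 := by omega
        subst this
        exact h (by rw [PySem.Int.mod_eq_zero_iff_dvd]; exact one_dvd area)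
      obtain ⟨h1, h2, h3, h4⟩ := ih (w - 1) (by omega) (by omega)
      refine ⟨h1, by omega, h3, ?_⟩
      intro e he1 he2
      rcases eq_or_lt_of_le he2 with heq | hlt
      · subst heq; exact h
      · exact h4 e he1 (by omega)
    · rw [if_neg h]
      have h := not_not.mp h
      exact ⟨hw, le_refl w, h, fun e he1 he2 => by omega⟩

-- A's loop, run with diff = area, lands on (area // D, D) for the greatest divisor D with D*D ≤ area.
theorem pvLoopA_eq (area D : Int) (ha : 1 ≤ area)
    (hD1 : 1 ≤ D) (hDdvd : PySem.Int.mod area D = 0) (hDsq : D * D ≤ area)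
    (hmax : ∀ e, D < e → e * e ≤ area → PySem.Int.mod area e ≠ 0) :
    ∀ (fuel : Nat) (i L W : Int), 1 ≤ i → (area + 1 - i).toNat ≤ fuel →
      pvLoopA area fuel i L W area =
        if i ≤ D then (PySem.Int.floordiv area D, D) else (L, W) := by
  intro fuel
  induction fuel with
  | zero =>
    intro i L W hi hfu
    have hDa : D ≤ area := by nlinarith
    have : ¬ i ≤ D := by omega
    rw [if_neg this]
    simp [pvLoopA]
  | succ fuel ih =>
    intro i L W hi hfu
    simp only [pvLoopA]
    by_cases hii : i * i ≤ area
    · rw [if_pos hii]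
      have hia : i ≤ area := by nlinarith
      have hfu' : (area + 1 - (i + 1)).toNat ≤ fuel := by omega
      by_cases hmi : PySem.Int.mod area i = 0
      · rw [if_pos hmi]
        have hiD : i ≤ D := by
          by_contra hcon
          exact hmax i (by omega) hii hmi
        have hfd : PySem.Int.floordiv area i = area / i :=
          PySem.Int.floordiv_eq_ediv_of_pos (by omega)
        have hij : i ≤ PySem.Int.floordiv area i := by
          rw [PySem.Int.le_floordiv_iff_mul_le (by omega)]; exact hii
        have hjle : PySem.Int.floordiv area i ≤ area := by
          rw [hfd]; exact Int.ediv_le_self i (by omega)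
        have habs : area > |PySem.Int.floordiv area i - i| := by
          rw [abs_of_nonneg (by omega)]; omega
        rw [if_pos habs, if_pos hij]
        rw [ih (i + 1) _ _ (by omega) hfu']
        by_cases hD2 : i + 1 ≤ D
        · rw [if_pos hD2, if_pos hiD]
        · have hDi : D = i := by omega
          rw [if_neg hD2, if_pos hiD, hDi]
      · rw [if_neg hmi]
        rw [ih (i + 1) L W (by omega) hfu']
        have hne : i ≠ D := fun h => hmi (h ▸ hDdvd)
        by_cases hD2 : i ≤ D
        · rw [if_pos hD2, if_pos (by omega : i + 1 ≤ D)]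
        · rw [if_neg hD2, if_neg (by omega : ¬ i + 1 ≤ D)]
    · rw [if_neg hii]
      have : ¬ i ≤ D := by
        intro hle
        exact hii (by nlinarith)
      rw [if_neg this]

-- ===== VERDICT (by name: the statement is the Claim_ definition above) =====
theorem constructRectangle_spec : Claim_equal_constructRectangle := by
  unfold Claim_equal_constructRectangle
  intro area _
  unfold Spec_constructRectangle constructRectangle constructRectangle_alt
  by_cases ha : area ≤ 0
  · rw [if_pos ha]
    have hfu : area.toNat + 1 = 1 := by omega
    rw [hfu]
    simp only [pvLoopA]
    rw [if_neg (by omega : ¬ (1:Int) * 1 ≤ area)]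
  · rw [if_neg ha]
    have ha1 : 1 ≤ area := by omega
    obtain ⟨hs1, hs2, hs3⟩ :=
      pvUpW_spec area area.toNat 1 (le_refl 1) (by omega) (by omega)
    set s := pvUpW area area.toNat 1 with hs
    have hsa : s ≤ area := by nlinarith
    obtain ⟨hD1, hD2, hD3, hD4⟩ :=
      pvDownW_spec area area.toNat s hs1 (by omega)
    set D := pvDownW area area.toNat s with hD
    have hDsq : D * D ≤ area := by nlinarith
    have hmax : ∀ e, D < e → e * e ≤ area → PySem.Int.mod area e ≠ 0 := by
      intro e he1 he2
      have hes : e ≤ s := by nlinarith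
      exact hD4 e he1 hes
    rw [pvLoopA_eq area D ha1 hD1 hD3 hDsq hmax (area.toNat + 1) 1 0 0 (le_refl 1) (by omega)]
    rw [if_pos hD1]
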